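-- pv_equiv track=rewrite | github.com/yolinab/Container_Optimisation-web-app | app/utils/visualize_row_blocks.py | summarize_pallets
-- ===== SOURCE A (Python) =====
-- from collections import Counter
--
-- def summarize_pallets(pallets, max_items=3):
--     """
--     Create a compact summary string of pallet composition.
--     Groups by (length x width x height).
--     Robust to key naming style: 'length' vs 'length_cm', etc.
--     """
--     if not pallets:
--         return "empty"
--
--     def _dim(pm, k1, k2):
--         return pm.get(k1, pm.get(k2, "?"))
--
--     counter = Counter(
--         f"{_dim(p,'length','length_cm')}x{_dim(p,'width','width_cm')}x{_dim(p,'height','height_cm')}"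
--         for p in pallets
--     )
--
--     parts = []
--     for k, v in counter.most_common(max_items):
--         parts.append(f"{k}×{v}")
--
--     if len(counter) > max_items:
--         parts.append("...")
--
--     return ", ".join(parts)
-- ===== SOURCE B (Python) =====
-- def _key(p):
--     return "x".join(
--         str(p.get(b, p.get(b + "_cm", "?")))
--         for b in ("length", "width", "height")
--     )
--
--
-- def summarize_pallets(pallets, max_items=3):
--     if not pallets:
--         return "empty"
--
--     keys = [_key(p) for p in pallets]
--     dist = []
--     for k in keys:
--         if k not in dist:
--             dist.append(k)
--
--     # selection loop: repeatedly extract the most frequent remaining key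
--     # (max returns the first maximal, so first-seen order breaks ties);
--     # counts recomputed with list.count -- no Counter, no dict, no sort
--     parts = []
--     pool = dist
--     while pool and len(parts) < max_items:
--         best = max(pool, key=keys.count)
--         parts.append(f"{best}\u00d7{keys.count(best)}")
--         pool = [k for k in pool if k != best]
--
--     if len(dist) > max_items:
--         parts.append("...")
--     return ", ".join(parts)
-- ===== Notes on version B (the rewrite author's own statement) =====
-- stated objective: alternative
-- what changed: Replaces the Counter + most_common (heap/sort) pipeline with a selection loop: an ordered dedup of the composite keys, then repeatedly extracting the most frequent remaining key with max(pool, key=keys.count) -- no frequency map and no sort, counts are recomputed by list.count.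
import Mathlib
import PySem

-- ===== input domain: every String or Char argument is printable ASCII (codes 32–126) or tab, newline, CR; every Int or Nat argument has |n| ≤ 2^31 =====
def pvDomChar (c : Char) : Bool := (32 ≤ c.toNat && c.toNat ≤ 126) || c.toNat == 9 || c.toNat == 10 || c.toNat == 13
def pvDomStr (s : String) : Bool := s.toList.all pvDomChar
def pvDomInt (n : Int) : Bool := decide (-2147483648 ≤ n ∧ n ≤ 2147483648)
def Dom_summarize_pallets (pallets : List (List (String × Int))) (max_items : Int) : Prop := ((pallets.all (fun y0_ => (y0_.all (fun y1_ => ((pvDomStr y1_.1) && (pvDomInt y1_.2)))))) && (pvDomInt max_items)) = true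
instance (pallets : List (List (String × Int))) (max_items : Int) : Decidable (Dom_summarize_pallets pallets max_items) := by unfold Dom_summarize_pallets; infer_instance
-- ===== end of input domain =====

-- B replaces the Counter + most_common selection by a selection loop that repeatedly
-- extracts the most frequent remaining key with max/list.count (objective: alternative).

-- ===== PORT A =====
-- _dim(pm, k1, k2) = pm.get(k1, pm.get(k2, "?")), stringified by the f-string
def pyDimA (d : PySem.Dict String Int) (k1 k2 : String) : String :=
  match d.get? k1 with
  | some v => PySem.Int.toStr v
  | none =>
    match d.get? k2 with
    | some v => PySem.Int.toStr v
    | none => "?"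

-- the f-string key f"{_dim(p,'length','length_cm')}x{…}x{…}"
def pyKeyA (p : List (String × Int)) : String :=
  let d := PySem.Dict.mk p
  pyDimA d "length" "length_cm" ++ "x" ++ pyDimA d "width" "width_cm" ++ "x" ++ pyDimA d "height" "height_cm"

-- Counter.most_common(n) = heapq.nlargest(n, items, key=itemgetter(1)):
-- [] for n ≤ 0, else the stable descending sort of the items by count, truncated to n
def pyMostCommon (items : List (String × Int)) (n : Int) : List (String × Int) :=
  if n ≤ 0 then [] else (PySem.List.sorted items (fun kv => kv.2) true).take n.toNat

def summarize_pallets (pallets : List (List (String × Int))) (max_items : Int) : String :=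
  if pallets = [] then "empty"
  else
    let counter := PySem.Dict.counter (pallets.map pyKeyA)
    let parts := (pyMostCommon counter.items max_items).foldl
      (fun acc kv => acc ++ [kv.1 ++ "×" ++ PySem.Int.toStr kv.2]) []
    let parts := if (counter.size : Int) > max_items then parts ++ ["..."] else parts
    PySem.Str.join ", " parts

-- ===== PORT B =====
-- _key(p): "x".join(str(p.get(b, p.get(b + "_cm", "?"))) for b in ("length","width","height"))
def pyKeyB (p : List (String × Int)) : String :=
  let d := PySem.Dict.mk p
  PySem.Str.join "x" (["length", "width", "height"].map (fun b =>
    match d.get? b with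
    | some v => PySem.Int.toStr v
    | none =>
      match d.get? (b ++ "_cm") with
      | some v => PySem.Int.toStr v
      | none => "?"))

-- the while loop: while pool and len(parts) < max_items:
--   best = max(pool, key=keys.count); parts.append(f"{best}×{keys.count(best)}")
--   pool = [k for k in pool if k != best]
def pickLoop (keys : List String) (max_items : Int) (parts : List String) (pool : List String) : List String :=
  if (parts.length : Int) < max_items then
    match hm : PySem.List.max? pool (fun k => (keys.count k : Int)) with
    | none => parts          -- pool is empty: the while condition fails
    | some best =>
        pickLoop keys max_items (parts ++ [best ++ "×" ++ PySem.Int.toStr (keys.count best)])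
          (pool.filter (fun k => k ≠ best))
  else parts
termination_by pool.length
decreasing_by
  have h1 : (List.filter (fun x : {x // x ∈ pool} => decide ((x : String) ≠ best))
      pool.attach).length < pool.attach.length := by
    refine List.length_filter_lt_length_iff_exists.mpr
      ⟨⟨best, PySem.List.max?_mem hm⟩, List.mem_attach _ _, ?_⟩
    simp
  simpa using h1

def summarize_pallets_alt (pallets : List (List (String × Int))) (max_items : Int) : String :=
  if pallets = [] then "empty"
  else
    let keys := pallets.map pyKeyB
    -- ordered dedup: for k in keys: if k not in dist: dist.append(k)
    let dist : PySem.Set String := PySem.Set.ofList keys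
    let parts := pickLoop keys max_items [] dist
    let parts := if (dist.length : Int) > max_items then parts ++ ["..."] else parts
    PySem.Str.join ", " parts

-- ===== PRECONDITION & SPEC =====
def Spec_summarize_pallets (pallets : List (List (String × Int))) (max_items : Int) (out : String) : Prop := out = summarize_pallets_alt pallets max_items
instance (pallets : List (List (String × Int))) (max_items : Int) (out : String) : Decidable (Spec_summarize_pallets pallets max_items out) := by unfold Spec_summarize_pallets; infer_instance

-- ===== CLAIM (what is proved, stated in full; the proofs are below) =====
def Claim_equal_summarize_pallets : Prop := ∀ (pallets : List (List (String × Int))) (max_items : Int), Dom_summarize_pallets pallets max_items → Spec_summarize_pallets pallets max_items (summarize_pallets pallets max_items)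

-- ===== LEMMAS AND PROOFS =====

-- "x".join of a three-element list, proved on the List Char side
theorem join3 (a b c : String) : PySem.Str.join "x" [a, b, c] = a ++ "x" ++ b ++ "x" ++ c := by
  apply String.ext
  simp [PySem.Str.join, PySem.Chars.join_cons_cons, PySem.Chars.join_singleton,
    String.toList_ofList, String.toList_append]

-- the two key builders agree
theorem pyKey_eq (p : List (String × Int)) : pyKeyB p = pyKeyA p := by
  unfold pyKeyB pyKeyA pyDimA
  simp only [List.map_cons, List.map_nil]
  rw [join3]
  rfl

-- max? over a snoc, read off the foldl definition
theorem max?_snoc {α κ : Type} [LT κ] [DecidableLT κ] (xs : List α) (x : α) (key : α → κ) :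
    PySem.List.max? (xs ++ [x]) key =
      match PySem.List.max? xs key with
      | none => some x
      | some m => if key m < key x then some x else some m := by
  simp only [PySem.List.max?, List.foldl_append]
  rfl

-- stable reverse insertion sort over a snoc
theorem sorted_rev_snoc {α κ : Type} [LT κ] [DecidableLT κ] (xs : List α) (x : α) (key : α → κ) :
    PySem.List.sorted (xs ++ [x]) key true =
      PySem.List.insertBy (fun a b => decide (key b < key a)) x (PySem.List.sorted xs key true) := by
  rw [PySem.List.sorted_rev_eq_foldl_insertBy, PySem.List.sorted_rev_eq_foldl_insertBy,
    List.foldl_append]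
  rfl

-- sorted of the empty list, read off the foldl characterization
theorem sorted_rev_nil {α κ : Type} [LT κ] [DecidableLT κ] (key : α → κ) :
    PySem.List.sorted ([] : List α) key true = [] := by
  rw [PySem.List.sorted_rev_eq_foldl_insertBy]
  rfl

-- insertBy commutes with map when the order only looks at the mapped key
theorem insertBy_map {α β κ : Type} [LT κ] [DecidableLT κ] (g : β → κ) (f : α → β) (x : α) :
    ∀ (acc : List α),
      PySem.List.insertBy (fun a b => decide (g b < g a)) (f x) (acc.map f) =
        (PySem.List.insertBy (fun a b => decide (g (f b) < g (f a))) x acc).map f := by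
  intro acc
  induction acc with
  | nil => simp [PySem.List.insertBy]
  | cons y ys ih =>
      simp only [List.map_cons, PySem.List.insertBy]
      by_cases h : g (f y) < g (f x)
      · simp [h]
      · simp [h, ih]

-- sorted of a mapped list, reverse=True
theorem sorted_rev_map {α β κ : Type} [LT κ] [DecidableLT κ] (g : β → κ) (f : α → β) (l : List α) :
    PySem.List.sorted (l.map f) g true =
      (PySem.List.sorted l (fun x => g (f x)) true).map f := by
  induction l using List.reverseRecOn with
  | nil => simp [sorted_rev_nil]
  | append_singleton xs x ih =>
      rw [List.map_append, List.map_singleton, sorted_rev_snoc, sorted_rev_snoc, ih,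
        insertBy_map]

-- stable descending sort = first maximal element, then the sort of the rest
theorem sorted_rev_max_cons {α κ : Type} [DecidableEq α] [LinearOrder κ] (key : α → κ) :
    ∀ (xs : List α) (m : α), PySem.List.max? xs key = some m →
      PySem.List.sorted xs key true = m :: PySem.List.sorted (xs.erase m) key true := by
  intro xs
  induction xs using List.reverseRecOn with
  | nil => intro m h; simp [PySem.List.max?] at h
  | append_singleton xs x ih =>
      intro m h
      rw [max?_snoc] at h
      cases hxs : PySem.List.max? xs key with
      | none =>
          have hnil : xs = [] := (PySem.List.max?_eq_none_iff xs key).mp hxs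
          rw [hxs] at h
          simp only [hnil, List.nil_append] at h ⊢
          cases h
          simp [PySem.List.sorted, PySem.List.insertBy, List.erase_cons_head]
      | some m0 =>
          rw [hxs] at h
          dsimp only at h
          by_cases hlt : key m0 < key x
          · rw [if_pos hlt] at h
            cases h
            have hx_notin : x ∉ xs := by
              intro hmem
              exact absurd (PySem.List.max?_isMax hxs x hmem) (not_le.mpr hlt)
            rw [List.erase_append_right _ hx_notin]
            simp only [List.erase_cons_head, List.append_nil]
            rw [sorted_rev_snoc]
            cases hs : PySem.List.sorted xs key true with
            | nil => simp [PySem.List.insertBy]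
            | cons y ys =>
                have hy : y ∈ xs := by
                  rw [← PySem.List.mem_sorted (key := key) (rev := true), hs]
                  exact List.mem_cons_self
                have : key y < key x := lt_of_le_of_lt (PySem.List.max?_isMax hxs y hy) hlt
                simp [PySem.List.insertBy, this]
          · rw [if_neg hlt] at h
            cases h
            have hmem := PySem.List.max?_mem hxs
            rw [List.erase_append_left _ hmem, sorted_rev_snoc, ih _ hxs]
            simp only [PySem.List.insertBy, decide_eq_true_eq, if_neg hlt]
            rw [← sorted_rev_snoc]

-- the selection loop produces exactly the formatted prefix of the stable descending sort
theorem pickLoop_spec (keys : List String) (mi : Int) :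
    ∀ (n : Nat) (pool : List String), pool.length ≤ n → pool.Nodup → ∀ (parts : List String),
      pickLoop keys mi parts pool =
        parts ++ ((PySem.List.sorted pool (fun k => (keys.count k : Int)) true).take
            (mi - parts.length).toNat).map
          (fun k => k ++ "×" ++ PySem.Int.toStr (keys.count k)) := by
  intro n
  induction n with
  | zero =>
      intro pool hlen _ parts
      have hnil : pool = [] := List.length_eq_zero_iff.mp (Nat.le_zero.mp hlen)
      subst hnil
      rw [pickLoop.eq_def]
      simp [PySem.List.max?, sorted_rev_nil]
  | succ n ih =>
      intro pool hlen hnd parts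
      rw [pickLoop.eq_def]
      by_cases hmi : (parts.length : Int) < mi
      · rw [if_pos hmi]
        split
        next hm =>
            have hnil : pool = [] := (PySem.List.max?_eq_none_iff _ _).mp hm
            simp [hnil, sorted_rev_nil]
        next best hm =>
            have hmem : best ∈ pool := PySem.List.max?_mem hm
            have hfilter : pool.filter (fun k => k ≠ best) = pool.erase best := by
              rw [List.Nodup.erase_eq_filter hnd]
              simp [bne, beq_eq_decide]
            have hlen' : (pool.erase best).length ≤ n := by
              have := List.length_erase_of_mem hmem
              omega
            rw [hfilter, ih _ hlen' (hnd.erase best)]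
            rw [sorted_rev_max_cons _ pool best hm]
            have hnat : (mi - parts.length).toNat
                = (mi - ((parts ++ [best ++ "×" ++ PySem.Int.toStr (keys.count best)]).length : Int)).toNat + 1 := by
              simp only [List.length_append, List.length_cons, List.length_nil]
              omega
            rw [hnat, List.take_succ_cons, List.map_cons, List.append_assoc]
            rfl
      · rw [if_neg hmi]
        have : (mi - parts.length).toNat = 0 := by omega
        simp [this]

-- ===== VERDICT (by name: the statement is the Claim_ definition above) =====
theorem summarize_pallets_spec : Claim_equal_summarize_pallets := by
  intro pallets max_items _
  unfold Spec_summarize_pallets summarize_pallets summarize_pallets_alt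
  by_cases hnil : pallets = []
  · simp [hnil]
  · simp only [if_neg hnil]
    have hkeys : pallets.map pyKeyB = pallets.map pyKeyA := by
      simp [pyKey_eq]
    set keys := pallets.map pyKeyA with hk
    rw [hkeys]
    have hitems := PySem.Dict.items_counter keys
    have hsize : (PySem.Dict.counter keys).size = (PySem.Set.ofList keys).length := by
      simp [PySem.Dict.size, hitems]
    rw [PySem.List.foldl_append_singleton_eq_map, List.nil_append,
      pickLoop_spec keys max_items (PySem.Set.ofList keys).length _ le_rfl
        (PySem.Set.nodup_ofList keys) [], hitems, hsize]
    unfold pyMostCommon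
    by_cases hmi : max_items ≤ 0
    · simp [hmi, show max_items.toNat = 0 by omega]
    · rw [if_neg hmi]
      rw [sorted_rev_map (fun kv : String × Int => kv.2) (fun k => (k, (keys.count k : Int)))]
      have : (max_items - (([] : List String).length : Int)).toNat = max_items.toNat := by
        simp
      rw [this, ← List.map_take, List.map_map, List.nil_append]
      rfl
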